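-- pv_equiv track=rewrite | github.com/parikshitsam/MyPythonProjects | c1_ds/Assignment+3.py | keep_string
-- ===== SOURCE A (Python) =====
-- def keep_string(row):
--     country = row["Country"]
--     new_string = ""
--     for char in country:
--         if char.isdigit():
--             break
--         new_string = new_string + char
--
--     if "(" in new_string:
--         new_string = new_string[:new_string.index("(")]
--     row["Country"] = new_string.strip()
--     return row
-- ===== SOURCE B (Python) =====
-- def keep_string(row):
--     country = row["Country"]
--     cutoff = len(country)
--     for i, ch in enumerate(country):
--         if ch.isdigit() or ch == '(':
--             cutoff = i
--             break
--     row["Country"] = country[:cutoff].strip()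
--     return row
-- ===== Notes on version B (the rewrite author's own statement) =====
-- stated objective: simpler
-- what changed: A copies characters one by one until the first digit and then does a second find-and-cut pass for '('; B computes a single cutoff index (first digit or '(') in one enumerate scan and slices once, since the paren only matters when it precedes the first digit.
import Mathlib
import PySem

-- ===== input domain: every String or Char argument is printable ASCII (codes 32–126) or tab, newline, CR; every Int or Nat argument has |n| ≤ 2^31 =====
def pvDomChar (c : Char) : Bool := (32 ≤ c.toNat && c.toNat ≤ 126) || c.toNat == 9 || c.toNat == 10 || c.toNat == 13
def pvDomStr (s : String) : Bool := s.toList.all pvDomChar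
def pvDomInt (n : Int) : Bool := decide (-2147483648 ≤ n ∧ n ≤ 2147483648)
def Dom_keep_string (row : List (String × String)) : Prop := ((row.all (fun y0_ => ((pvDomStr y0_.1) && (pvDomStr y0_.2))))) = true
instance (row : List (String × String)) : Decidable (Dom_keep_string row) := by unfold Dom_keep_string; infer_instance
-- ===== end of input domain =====

-- B replaces A's two-pass truncation (copy chars until a digit, then cut at '(') by a single
-- scan for the first digit-or-'(' index and one slice: a simpler decomposition, same cost.
-- Both programs mutate row["Country"] in place in Python; B performs the same mutation.

-- ===== PORT A =====
-- 'for char in country: if char.isdigit(): break; new_string += char'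
def keepStringLoopA : List Char → List Char → List Char
  | [], acc => acc
  | c :: rest, acc =>
      if PySem.Chars.isdigit c then acc else keepStringLoopA rest (acc ++ [c])

def keep_string (row : List (String × String)) : List (String × String) :=
  match (PySem.Dict.mk row).get? "Country" with
  | none => row     -- row["Country"] raises KeyError: excluded by Pre_
  | some country =>
      let ns := keepStringLoopA country.toList []
      let ns2 := if PySem.Chars.isIn ['('] ns
                 then PySem.List.slice ns none (some (PySem.Chars.find ns ['(']))
                 else ns
      ((PySem.Dict.mk row).insert "Country" (String.ofList (PySem.Chars.strip ns2))).items

-- ===== PORT B =====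
-- 'for i, ch in enumerate(country): if ch.isdigit() or ch == '(': cutoff = i; break'
def keepStringCutB : List (Int × Char) → Int → Int
  | [], cutoff => cutoff
  | (i, c) :: rest, cutoff =>
      if PySem.Chars.isdigit c || c == '(' then i else keepStringCutB rest cutoff

def keep_string_alt (row : List (String × String)) : List (String × String) :=
  match (PySem.Dict.mk row).get? "Country" with
  | none => row     -- row["Country"] raises KeyError: excluded by Pre_
  | some country =>
      let cs := country.toList
      let cutoff := keepStringCutB (PySem.List.enumerate cs 0) (cs.length : Int)
      ((PySem.Dict.mk row).insert "Country"
        (String.ofList (PySem.Chars.strip (PySem.List.slice cs none (some cutoff))))).items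

-- ===== PRECONDITION & SPEC =====
-- Pre_: the Python raises KeyError when the row has no "Country" key; exactly those inputs are excluded.
def Pre_keep_string (row : List (String × String)) : Prop :=
  (PySem.Dict.mk row).contains "Country" = true
instance (row : List (String × String)) : Decidable (Pre_keep_string row) := by
  unfold Pre_keep_string; infer_instance

def pvWitness_keep_string : (List (String × String)) := [("Country", " France (x)12"), ("pop", "7")]

def Spec_keep_string (row : List (String × String)) (out : List (String × String)) : Prop := out = keep_string_alt row
instance (row : List (String × String)) (out : List (String × String)) : Decidable (Spec_keep_string row out) := by unfold Spec_keep_string; infer_instance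

-- ===== CLAIM (what is proved, stated in full; the proofs are below) =====
def Claim_equal_keep_string : Prop := ∀ (row : List (String × String)), Dom_keep_string row → Pre_keep_string row → Spec_keep_string row (keep_string row)

-- ===== LEMMAS AND PROOFS =====

-- A's first loop is takeWhile (not isdigit)
lemma keepStringLoopA_eq (cs acc : List Char) :
    keepStringLoopA cs acc = acc ++ cs.takeWhile (fun c => !PySem.Chars.isdigit c) := by
  induction cs generalizing acc with
  | nil => simp [keepStringLoopA]
  | cons c rest ih =>
      by_cases h : PySem.Chars.isdigit c <;>
        simp [keepStringLoopA, h, ih]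

-- B's scan returns the length of the takeWhile prefix (shifted by the enumeration start)
lemma keepStringCutB_eq (cs : List Char) (s : Int) :
    keepStringCutB (PySem.List.enumerate cs s) (s + cs.length) =
      s + ((cs.takeWhile (fun c => !(PySem.Chars.isdigit c || c == '('))).length : Int) := by
  induction cs generalizing s with
  | nil => simp [PySem.List.enumerate_nil, keepStringCutB]
  | cons c rest ih =>
      rw [PySem.List.enumerate_cons]
      by_cases h : (PySem.Chars.isdigit c || c == '(') = true
      · simp [keepStringCutB, h, List.takeWhile_cons]
        intro hd
        simpa [hd] using h
      · have := ih (s + 1)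
        simp only [keepStringCutB, h, if_neg, List.takeWhile_cons,
          Bool.not_eq_true] at *
        rw [show s + ((c :: rest).length : Int) = (s + 1) + rest.length by
          simp; ring]
        rw [this]
        simp
        ring
-- takeWhile of takeWhile combines the predicates
lemma takeWhile_takeWhile_char (l : List Char) (p q : Char → Bool) :
    (l.takeWhile p).takeWhile q = l.takeWhile (fun a => p a && q a) := by
  induction l with
  | nil => rfl
  | cons c rest ih => by_cases hp : p c <;> by_cases hq : q c <;> simp [hp, hq, ih]

-- take at the first failing index is takeWhile
lemma take_eq_takeWhile_of_first {l : List Char} {q : Char → Bool} {k : Nat}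
    (hk : k ≤ l.length)
    (hfail : ∀ (h : k < l.length), q l[k] = false)
    (hpre : ∀ i (h : i < k), ∀ (hi : i < l.length), q l[i] = true) :
    l.take k = l.takeWhile q := by
  induction l generalizing k with
  | nil => simp
  | cons c rest ih =>
      cases k with
      | zero =>
          have := hfail (by simp)
          simp at this
          simp [this]
      | succ k =>
          have hq : q c = true := hpre 0 (by omega) (by simp)
          simp only [List.take_succ_cons, List.takeWhile_cons, hq, if_pos]
          refine congrArg (c :: ·) (ih (by simpa using hk) ?_ ?_)
          · intro hlt; exact hfail (by simpa using hlt)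
          · intro i hi hlen; exact hpre (i + 1) (by omega) (by simpa using hlen)

-- the core string fact: A's truncation equals B's single-scan truncation
lemma keepString_core (cs : List Char) :
    (let ns := keepStringLoopA cs [];
     if PySem.Chars.isIn ['('] ns
     then PySem.List.slice ns none (some (PySem.Chars.find ns ['(']))
     else ns) =
    PySem.List.slice cs none
      (some (keepStringCutB (PySem.List.enumerate cs 0) (cs.length : Int))) := by
  have hcut := keepStringCutB_eq cs 0
  rw [zero_add] at hcut
  rw [hcut, zero_add, PySem.List.slice_to_natCast]
  set q : Char → Bool := fun c => !(PySem.Chars.isdigit c || c == '(') with hq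
  have hB : cs.take (cs.takeWhile q).length = cs.takeWhile q :=
    (List.prefix_iff_eq_take.mp (List.takeWhile_prefix q)).symm
  rw [hB]
  set t := keepStringLoopA cs [] with ht
  have htw : t = cs.takeWhile (fun c => !PySem.Chars.isdigit c) := by
    rw [ht, keepStringLoopA_eq]; simp
  have hcomb : t.takeWhile (fun c => !(c == '(')) = cs.takeWhile q := by
    rw [htw, takeWhile_takeWhile_char]
    have hfun : (fun a => (!PySem.Chars.isdigit a) && !(a == '(')) = q := by
      funext a; simp [hq, Bool.not_or]
    rw [hfun]
  by_cases hin : PySem.Chars.isIn ['('] t = true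
  · simp only [hin, if_true]
    have hinf : ['('] <:+: t := (PySem.Chars.isIn_iff_infix _ _).mp hin
    have hmem : '(' ∈ t := (List.singleton_infix_iff _ _).mp hinf
    have hnn : 0 ≤ PySem.Chars.find t ['('] := (PySem.Chars.find_nonneg_iff _ _).mpr hinf
    obtain ⟨hprefix, hmin⟩ := PySem.Chars.find_spec (s := t) (sub := ['(']) hnn
    set k := (PySem.Chars.find t ['(']).toNat with hk
    rw [PySem.List.slice_to t hnn, ← hk, ← hcomb]
    have hklen : k < t.length := by
      by_contra hge
      rw [not_lt] at hge
      obtain ⟨u, hu⟩ := hprefix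
      rw [List.drop_eq_nil_of_le hge] at hu
      simp at hu
    apply take_eq_takeWhile_of_first (le_of_lt hklen)
    · intro h
      obtain ⟨u, hu⟩ := hprefix
      have : t[k] = '(' := by
        have := congrArg (fun l => l.head?) hu
        simpa [List.head?_drop, List.getElem?_eq_getElem h] using this.symm
      simp [this]
    · intro i hi hlen
      have hni : ¬ ['('] <+: t.drop i := hmin i hi
      have : t[i] ≠ '(' := by
        intro heq
        apply hni
        have hd : t.drop i = '(' :: t.drop (i + 1) := by
          rw [List.drop_eq_getElem_cons hlen, heq]
        rw [hd]
        exact ⟨_, rfl⟩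
      simp [this]
  · simp only [hin]
    have hnin : '(' ∉ t := by
      intro hm
      exact hin ((PySem.Chars.isIn_iff_infix _ _).mpr ((List.singleton_infix_iff _ _).mpr hm))
    rw [← hcomb]
    symm
    exact List.takeWhile_eq_self_iff.mpr (fun a ha => by simp [ne_of_mem_of_not_mem ha hnin])

-- ===== VERDICT (by name: the statement is the Claim_ definition above) =====
theorem keep_string_spec : Claim_equal_keep_string := by
  intro row _ hpre
  unfold Spec_keep_string keep_string keep_string_alt
  have hsome : ((PySem.Dict.mk row).get? "Country").isSome := by
    unfold Pre_keep_string at hpre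
    simp [PySem.Dict.contains, PySem.Dict.get?] at *
    exact Exists.imp (fun a a_1 => a_1) hpre
  obtain ⟨country, hc⟩ := Option.isSome_iff_exists.mp hsome
  rw [hc]
  simp only
  rw [← keepString_core country.toList]
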